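-- pv_equiv track=rewrite | github.com/rz-zhang/Module-based-few-shot-event-extraction | utils.py | srl_find_trigger
-- ===== SOURCE A (Python) =====
-- def srl_find_trigger(srl_tags):
--       start_flag = True
--       tag_start, tag_end = None, None
--       for i, tag in enumerate(srl_tags):
--         if tag.split('-')[-1]=='V' and start_flag:
--           tag_start = i
--           start_flag = False
--         if not start_flag and tag.split('-')[-1]!='V':
--           tag_end = i
--           break
--       return tag_start, tag_end
-- ===== SOURCE B (Python) =====
-- def srl_find_trigger(srl_tags):
--     # Precompute a boolean V-mask once, then answer with index searches
--     # on the mask (no explicit scanning loops, no flag state).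
--     is_v = [tag.split('-')[-1] == 'V' for tag in srl_tags]
--     try:
--         tag_start = is_v.index(True)
--     except ValueError:
--         return None, None
--     try:
--         tag_end = is_v.index(False, tag_start)
--     except ValueError:
--         tag_end = None
--     return tag_start, tag_end
-- ===== Notes on version B (the rewrite author's own statement) =====
-- stated objective: idiomatic
-- what changed: Replaced the flag-driven single loop by a precomputed boolean V-mask queried with list.index searches (index(True) for the start, index(False, start) for the end), with ValueError handling instead of flag/break control flow.
import Mathlib
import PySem

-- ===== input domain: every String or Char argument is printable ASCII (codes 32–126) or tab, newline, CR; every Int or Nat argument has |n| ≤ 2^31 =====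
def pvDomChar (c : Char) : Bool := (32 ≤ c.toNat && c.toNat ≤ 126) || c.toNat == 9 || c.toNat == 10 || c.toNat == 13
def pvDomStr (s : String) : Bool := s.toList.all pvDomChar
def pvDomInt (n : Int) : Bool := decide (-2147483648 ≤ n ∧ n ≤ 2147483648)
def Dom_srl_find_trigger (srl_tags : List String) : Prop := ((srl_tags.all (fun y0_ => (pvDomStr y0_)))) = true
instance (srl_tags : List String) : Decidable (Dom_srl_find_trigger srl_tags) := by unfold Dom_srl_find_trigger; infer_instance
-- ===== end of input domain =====

-- B replaces A's flag-driven loop by a precomputed boolean V-mask queried with index searches (objective: idiomatic).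

-- ===== PORT A =====
-- tag.split('-')[-1] == 'V'  (A's copy of the test)
def pvIsVA (tag : String) : Bool := PySem.List.pyGet? ((PySem.Str.split? tag "-").getD []) (-1) == some "V"  -- split? is some (sep ≠ ""); exact for tag.split('-')[-1]=='V'

-- A's for-loop with its start_flag state machine and break, as structural recursion over the list with the running index
def pvLoopA : List String → Int → Bool → Option Int → Option Int → Option Int × Option Int
  | [], _, _, tag_start, tag_end => (tag_start, tag_end)
  | tag :: rest, i, start_flag, tag_start, tag_end =>
    let tag_start' := if pvIsVA tag && start_flag then some i else tag_start
    let start_flag' := if pvIsVA tag && start_flag then false else start_flag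
    if !start_flag' && !(pvIsVA tag) then (tag_start', some i)   -- break
    else pvLoopA rest (i + 1) start_flag' tag_start' tag_end

def srl_find_trigger (srl_tags : List String) : Option Int × Option Int :=
  pvLoopA srl_tags 0 true none none

-- ===== PORT B =====
-- B's copy of the test tag.split('-')[-1] == 'V'
def pvIsVB (tag : String) : Bool := PySem.List.pyGet? ((PySem.Str.split? tag "-").getD []) (-1) == some "V"  -- split? is some (sep ≠ ""); exact for tag.split('-')[-1]=='V'

-- is_v.index(x, start): first index i ≥ start with is_v[i] == x (none = ValueError), ported by hand
def pvIndexFromB : List Bool → Bool → Int → Int → Option Int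
  | [], _, _, _ => none
  | b :: r, x, i, s => if s ≤ i && b == x then some i else pvIndexFromB r x (i + 1) s

def srl_find_trigger_alt (srl_tags : List String) : Option Int × Option Int :=
  let is_v := srl_tags.map pvIsVB
  match PySem.List.index? is_v true with          -- is_v.index(True); none = ValueError → (None, None)
  | none => (none, none)
  | some s => (some (s : Int), pvIndexFromB is_v false 0 (s : Int))   -- is_v.index(False, tag_start)

-- ===== PRECONDITION & SPEC =====
def Spec_srl_find_trigger (srl_tags : List String) (out : Option Int × Option Int) : Prop := out = srl_find_trigger_alt srl_tags
instance (srl_tags : List String) (out : Option Int × Option Int) : Decidable (Spec_srl_find_trigger srl_tags out) := by unfold Spec_srl_find_trigger; infer_instance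

-- ===== CLAIM (what is proved, stated in full; the proofs are below) =====
def Claim_equal_srl_find_trigger : Prop := ∀ (srl_tags : List String), Dom_srl_find_trigger srl_tags → Spec_srl_find_trigger srl_tags (srl_find_trigger srl_tags)

-- ===== LEMMAS AND PROOFS =====

-- proof-side helpers: first V index from i / first non-V index from i
def pvFindS : List String → Int → Option Int
  | [], _ => none
  | tag :: rest, i => if pvIsVA tag then some i else pvFindS rest (i + 1)

def pvFindE : List String → Int → Option Int
  | [], _ => none
  | tag :: rest, j => if !(pvIsVA tag) then some j else pvFindE rest (j + 1)

theorem pvIsVB_eq (t : String) : pvIsVB t = pvIsVA t := rfl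

-- after the start is found, A's loop (flag down, start fixed) is exactly the end-search
theorem pvLoopA_after (rest : List String) : ∀ (i : Int) (s : Option Int),
    pvLoopA rest i false s none = (s, pvFindE rest i) := by
  induction rest with
  | nil => intro i s; simp [pvLoopA, pvFindE]
  | cons t r ih =>
    intro i s
    by_cases h : pvIsVA t = true
    · simp [pvLoopA, pvFindE, h, ih]
    · have hA : pvIsVA t = false := by simpa using h
      simp [pvLoopA, pvFindE, hA]

theorem pvFindS_ge (l : List String) : ∀ (i s : Int), pvFindS l i = some s → i ≤ s := by
  induction l with
  | nil => intro i s h; simp [pvFindS] at h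
  | cons t r ih =>
    intro i s h
    unfold pvFindS at h
    split_ifs at h with hv
    · simp at h; omega
    · have := ih (i + 1) s h; omega

-- A's full loop from a fresh flag, as the two phase-searches (index-shift generalised)
theorem pvLoopA_main (l : List String) : ∀ (i : Int),
    pvLoopA l i true none none =
      (match pvFindS l i with
       | none => (none, none)
       | some s => (some s, pvFindE (l.drop (s - i + 1).toNat) (s + 1))) := by
  induction l with
  | nil => intro i; simp [pvLoopA, pvFindS]
  | cons t r ih =>
    intro i
    by_cases h : pvIsVA t = true
    · simp only [pvLoopA, pvFindS, h]
      simp [pvLoopA_after]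
    · have hA : pvIsVA t = false := by simpa using h
      rw [show pvLoopA (t :: r) i true none none = pvLoopA r (i + 1) true none none from by
        simp [pvLoopA, hA]]
      rw [ih (i + 1)]
      rw [show pvFindS (t :: r) i = pvFindS r (i + 1) from by
        simp [pvFindS, hA]]
      cases hs : pvFindS r (i + 1) with
      | none => rfl
      | some s =>
        have hge := pvFindS_ge r (i + 1) s hs
        have h1 : (s - i + 1).toNat = (s - (i + 1) + 1).toNat + 1 := by omega
        simp [h1]

-- index?(True) on the mask is pvFindS, shifted
theorem pvIndex_mask (l : List String) : ∀ (i : Int),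
    pvFindS l i = (PySem.List.index? (l.map pvIsVB) true).map (fun k : Nat => i + (k : Int)) := by
  induction l with
  | nil => intro i; simp [pvFindS, PySem.List.index?_eq_idxOf?, List.idxOf?]
  | cons t r ih =>
    intro i
    by_cases h : pvIsVA t = true
    · rw [show pvFindS (t :: r) i = some i from by simp [pvFindS, h]]
      have hb : pvIsVB t = true := by simp [pvIsVB_eq, h]
      rw [List.map_cons, hb, PySem.List.index?_cons_self]
      simp
    · have hA : pvIsVA t = false := by simpa using h
      have hne : pvIsVB t ≠ true := by simp [pvIsVB_eq, hA]
      rw [show pvFindS (t :: r) i = pvFindS r (i + 1) from by simp [pvFindS, hA]]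
      rw [ih (i + 1), List.map_cons, PySem.List.index?_cons_of_ne _ hne]
      cases PySem.List.index? (r.map pvIsVB) true with
      | none => rfl
      | some k =>
        simp only [Option.map_some]
        congr 1
        push_cast
        ring

-- skipping phase of pvIndexFromB: indices below s never match
theorem pvIndexFromB_skip (m : List Bool) : ∀ (x : Bool) (i s : Int), i ≤ s →
    pvIndexFromB m x i s = pvIndexFromB (m.drop (s - i).toNat) x s s := by
  induction m with
  | nil => intro x i s _; simp [pvIndexFromB]
  | cons b r ih =>
    intro x i s hle
    by_cases he : i = s
    · subst he; simp
    · have hlt : i < s := lt_of_le_of_ne hle he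
      have hcond : ¬ (s ≤ i) := by omega
      rw [show pvIndexFromB (b :: r) x i s = pvIndexFromB r x (i + 1) s from by
        simp [pvIndexFromB, hcond]]
      rw [ih x (i + 1) s (by omega)]
      have h1 : (s - i).toNat = (s - (i + 1)).toNat + 1 := by omega
      simp [h1]

-- from s onwards pvIndexFromB (on the mask, for False) is the plain non-V search
theorem pvIndexFromB_plain (l : List String) : ∀ (i s : Int), s ≤ i →
    pvIndexFromB (l.map pvIsVB) false i s = pvFindE l i := by
  induction l with
  | nil => intro i s _; simp [pvIndexFromB, pvFindE]
  | cons t r ih =>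
    intro i s hle
    by_cases h : pvIsVA t = true
    · rw [List.map_cons]
      rw [show pvIndexFromB (pvIsVB t :: r.map pvIsVB) false i s = pvIndexFromB (r.map pvIsVB) false (i + 1) s from by
        simp [pvIndexFromB, pvIsVB_eq, h]]
      rw [ih (i + 1) s (by omega)]
      simp [pvFindE, h]
  
    · have hA : pvIsVA t = false := by simpa using h
      rw [List.map_cons]
      rw [show pvIndexFromB (pvIsVB t :: r.map pvIsVB) false i s = some i from by
        simp [pvIndexFromB, pvIsVB_eq, hA, hle]]
      simp [pvFindE, hA]

-- ===== VERDICT (by name: the statement is the Claim_ definition above) =====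
theorem srl_find_trigger_spec : Claim_equal_srl_find_trigger := by
  intro srl_tags _
  unfold Spec_srl_find_trigger srl_find_trigger srl_find_trigger_alt
  rw [pvLoopA_main srl_tags 0]
  rw [pvIndex_mask srl_tags 0]
  cases hs : PySem.List.index? (srl_tags.map pvIsVB) true with
  | none => simp only [hs]; rfl
  | some k =>
    simp only [hs, Option.map_some]
    have hk : ∃ (hk : k < (srl_tags.map pvIsVB).length), (srl_tags.map pvIsVB)[k] = true ∧
        ∀ j (hj : j < k), (srl_tags.map pvIsVB)[j] ≠ true :=
      PySem.List.getElem_of_index?_eq_some hs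
    obtain ⟨hklen, hkv, _⟩ := hk
    have hklen' : k < srl_tags.length := by simpa using hklen
    -- left components agree
    have h0k : (0 : Int) + (k : Int) = (k : Int) := by ring
    rw [h0k]
    -- right component: skip to k, step over the true at k, then plain search
    have hskip := pvIndexFromB_skip (srl_tags.map pvIsVB) false 0 (k : Int) (by positivity)
    have hdropnat : ((k : Int) - 0).toNat = k := by omega
    rw [hdropnat] at hskip
    have hdropcons : (srl_tags.map pvIsVB).drop k = true :: (srl_tags.map pvIsVB).drop (k + 1) := by
      rw [List.drop_eq_getElem_cons hklen, hkv]
    rw [hdropcons] at hskip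
    have hstep : pvIndexFromB (true :: (srl_tags.map pvIsVB).drop (k + 1)) false (k : Int) (k : Int)
        = pvIndexFromB ((srl_tags.map pvIsVB).drop (k + 1)) false ((k : Int) + 1) (k : Int) := by
      simp [pvIndexFromB]
    have hmapdrop : (srl_tags.map pvIsVB).drop (k + 1) = (srl_tags.drop (k + 1)).map pvIsVB := by
      simp [List.map_drop]
    have hplain := pvIndexFromB_plain (srl_tags.drop (k + 1)) ((k : Int) + 1) (k : Int) (by omega)
    have htoNat : ((k : Int) - 0 + 1).toNat = k + 1 := by omega
    simp only [htoNat]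
    rw [hskip, hstep, hmapdrop, hplain]
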